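-- pv_equiv track=rewrite | github.com/treebbb/cribserver | src/python/cribserver/simulate_kitty.py | score_play_sequence
-- ===== SOURCE A (Python) =====
-- import itertools
-- from collections import defaultdict
--
-- def card_value(card):
--     return min(card[0], 10)
--
-- def score_play_sequence(play_seq, is_dealer):
--     my_score = 0
--     opp_score = 0
--     total = 0
--     my_turns = range(0, 8, 2) if not is_dealer else range(1, 8, 2)
--     played_cards = []
--     value_counts = defaultdict(int)
--
--     for i, card in enumerate(play_seq):
--         total += card_value(card)
--         is_my_turn = i in my_turns
--         played_cards.append(card)
--         current_value = card_value(card)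
--         value_counts[current_value] += 1
--
--         # Score 15 or 31
--         if total == 15:
--             if is_my_turn:
--                 my_score += 2
--             else:
--                 opp_score += 2
--         elif total == 31:
--             if is_my_turn:
--                 my_score += 2
--             else:
--                 opp_score += 2
--
--         # Pairs, triplets, quads (any combination)
--         if value_counts[current_value] == 2:
--             if is_my_turn:
--                 my_score += 2
--             else:
--                 opp_score += 2
--         elif value_counts[current_value] == 3:
--             if is_my_turn:
--                 my_score += 4  # Additional 4 for triplet
--             else:
--                 opp_score += 4
--         elif value_counts[current_value] == 4:
--             if is_my_turn:
--                 my_score += 6  # Additional 6 for quad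
--             else:
--                 opp_score += 6
--
--         # Runs (any combination of played cards)
--         current_values = sorted([card_value(c) for c in played_cards])
--         for length in range(3, min(len(played_cards) + 1, 6)):
--             for subset in itertools.combinations(current_values, length):
--                 if max(subset) - min(subset) == length - 1 and len(set(subset)) == length:
--                     if is_my_turn:
--                         my_score += length
--                     else:
--                         opp_score += length
--
--     return my_score
-- ===== SOURCE B (Python) =====
-- def score_play_sequence(play_seq, is_dealer):
--     # Same scoring, but runs are counted arithmetically from value counts
--     # (number of run combinations = product of counts over a consecutive window)
--     # instead of enumerating itertools.combinations of all played cards.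
--     my_score = 0
--     opp_score = 0
--     total = 0
--     parity = 1 if is_dealer else 0
--     counts = {}
--     for i, card in enumerate(play_seq):
--         v = min(card[0], 10)
--         total += v
--         counts[v] = counts.get(v, 0) + 1
--         pts = 0
--         if total == 15 or total == 31:
--             pts += 2
--         c = counts[v]
--         if 2 <= c <= 4:
--             pts += 2 * (c - 1)
--         n = i + 1
--         for length in range(3, min(n + 1, 6)):
--             ways = 0
--             for start in counts:
--                 prod = 1
--                 for j in range(length):
--                     prod *= counts.get(start + j, 0)
--                 ways += prod
--             pts += length * ways
--         if i < 8 and i % 2 == parity: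
--             my_score += pts
--         else:
--             opp_score += pts
--     return my_score
-- ===== Notes on version B (the rewrite author's own statement) =====
-- stated objective: faster
-- what changed: The per-card run scoring no longer enumerates itertools.combinations of all played values: it counts run combinations arithmetically as products of value counts over consecutive windows (keys of the count dict), and drops the played_cards list and sorting entirely; 15/31 and pair scoring are folded into one per-card points accumulator with the pair bonus computed as 2*(count-1).
import Mathlib
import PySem

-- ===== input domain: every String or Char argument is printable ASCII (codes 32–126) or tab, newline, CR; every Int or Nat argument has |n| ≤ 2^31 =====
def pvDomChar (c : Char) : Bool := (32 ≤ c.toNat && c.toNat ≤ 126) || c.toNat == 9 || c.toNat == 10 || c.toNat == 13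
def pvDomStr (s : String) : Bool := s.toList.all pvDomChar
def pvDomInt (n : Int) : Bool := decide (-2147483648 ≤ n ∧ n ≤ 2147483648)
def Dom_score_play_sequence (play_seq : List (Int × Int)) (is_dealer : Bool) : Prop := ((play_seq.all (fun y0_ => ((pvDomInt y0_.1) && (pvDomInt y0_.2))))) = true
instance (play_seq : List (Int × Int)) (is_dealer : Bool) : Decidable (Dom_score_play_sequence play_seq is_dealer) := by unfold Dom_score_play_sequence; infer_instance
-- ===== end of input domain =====

-- B replaces A's per-card itertools.combinations run enumeration by window-product
-- counting over the value-count dict (objective: faster).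

-- ===== PORT A =====
def card_value (card : Int × Int) : Int := min card.1 10

-- one iteration of A's `for i, card in enumerate(play_seq)` loop;
-- state = (my_score, opp_score, total, played_cards, value_counts)
def pvStepA (my_turns : List Int)
    (st : Int × Int × Int × List (Int × Int) × PySem.Dict Int Int)
    (ic : Int × (Int × Int)) : Int × Int × Int × List (Int × Int) × PySem.Dict Int Int :=
  let i := ic.1
  let card := ic.2
  let total := st.2.2.1 + card_value card
  let is_my_turn : Bool := decide (i ∈ my_turns)
  let played_cards := st.2.2.2.1 ++ [card]
  let current_value := card_value card
  let value_counts := st.2.2.2.2.modify current_value 0 (· + 1)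
  -- Score 15 or 31
  let ms : Int × Int :=
    if total = 15 then
      (if is_my_turn then (st.1 + 2, st.2.1) else (st.1, st.2.1 + 2))
    else if total = 31 then
      (if is_my_turn then (st.1 + 2, st.2.1) else (st.1, st.2.1 + 2))
    else (st.1, st.2.1)
  -- Pairs, triplets, quads
  let c := value_counts.getD current_value 0
  let ms : Int × Int :=
    if c = 2 then (if is_my_turn then (ms.1 + 2, ms.2) else (ms.1, ms.2 + 2))
    else if c = 3 then (if is_my_turn then (ms.1 + 4, ms.2) else (ms.1, ms.2 + 4))
    else if c = 4 then (if is_my_turn then (ms.1 + 6, ms.2) else (ms.1, ms.2 + 6))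
    else ms
  -- Runs (any combination of played cards)
  let current_values := PySem.List.sorted (played_cards.map (fun c => card_value c)) (fun x => x) false
  let ms : Int × Int :=
    (PySem.List.pyRange 3 (min ((played_cards.length : Int) + 1) 6) 1).foldl (fun ms length =>
      -- `length` is always 3, 4 or 5 here, so `length.toNat` is exact and every
      -- emitted subset is nonempty (max/min cannot hit the unreachable `.getD 0`)
      (PySem.List.combinations current_values length.toNat).foldl (fun ms subset =>
        if (PySem.List.max? subset (fun x => x)).getD 0 - (PySem.List.min? subset (fun x => x)).getD 0 = length - 1
            ∧ ((PySem.Set.ofList subset).length : Int) = length then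
          (if is_my_turn then (ms.1 + length, ms.2) else (ms.1, ms.2 + length))
        else ms) ms) ms
  (ms.1, ms.2, total, played_cards, value_counts)

def score_play_sequence (play_seq : List (Int × Int)) (is_dealer : Bool) : Int :=
  let my_turns := if !is_dealer then PySem.List.pyRange 0 8 2 else PySem.List.pyRange 1 8 2
  ((PySem.List.enumerate play_seq).foldl (pvStepA my_turns)
    (0, 0, 0, ([] : List (Int × Int)), PySem.Dict.empty)).1

-- ===== PORT B =====
-- one iteration of B's loop; state = (my_score, opp_score, total, counts)
def pvStepB (parity : Int)
    (st : Int × Int × Int × PySem.Dict Int Int)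
    (ic : Int × (Int × Int)) : Int × Int × Int × PySem.Dict Int Int :=
  let i := ic.1
  let card := ic.2
  let v := min card.1 10
  let total := st.2.2.1 + v
  let counts := st.2.2.2.insert v (st.2.2.2.getD v 0 + 1)
  let pts : Int := if total = 15 ∨ total = 31 then 2 else 0
  let c := counts.getD v 0
  let pts := pts + (if 2 ≤ c ∧ c ≤ 4 then 2 * (c - 1) else 0)
  let n : Int := i + 1
  let pts := (PySem.List.pyRange 3 (min (n + 1) 6) 1).foldl (fun pts length =>
    let ways := counts.keys.foldl (fun w start =>
      w + (PySem.List.pyRange 0 length 1).foldl (fun p j => p * counts.getD (start + j) 0) 1) 0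
    pts + length * ways) pts
  if i < 8 ∧ PySem.Int.mod i 2 = parity then (st.1 + pts, st.2.1, total, counts)
  else (st.1, st.2.1 + pts, total, counts)

def score_play_sequence_alt (play_seq : List (Int × Int)) (is_dealer : Bool) : Int :=
  let parity : Int := if is_dealer then 1 else 0
  ((PySem.List.enumerate play_seq).foldl (pvStepB parity)
    (0, 0, 0, PySem.Dict.empty)).1



-- ===== PRECONDITION & SPEC =====
def Spec_score_play_sequence (play_seq : List (Int × Int)) (is_dealer : Bool) (out : Int) : Prop := out = score_play_sequence_alt play_seq is_dealer
instance (play_seq : List (Int × Int)) (is_dealer : Bool) (out : Int) : Decidable (Spec_score_play_sequence play_seq is_dealer out) := by unfold Spec_score_play_sequence; infer_instance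

-- ===== CLAIM (what is proved, stated in full; the proofs are below) =====
def Claim_equal_score_play_sequence : Prop := ∀ (play_seq : List (Int × Int)) (is_dealer : Bool), Dom_score_play_sequence play_seq is_dealer → Spec_score_play_sequence play_seq is_dealer (score_play_sequence play_seq is_dealer)

-- ===== LEMMAS AND PROOFS =====


lemma pvNodup_of_ofList_length (t : List Int) (h : (PySem.Set.ofList t).length = t.length) : t.Nodup := by
  induction t using List.reverseRecOn with
  | nil => simp
  | append_singleton xs x ih =>
    rw [PySem.Set.ofList_append_singleton] at h
    by_cases hx : x ∈ PySem.Set.ofList xs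
    · rw [PySem.Set.add_of_mem hx] at h
      have := PySem.Set.length_ofList_le xs
      simp at h
      omega
    · rw [PySem.Set.add_of_not_mem hx] at h
      simp at h
      have hnd := ih h
      have hxs : x ∉ xs := fun hmem => hx ((PySem.Set.mem_ofList xs x).mpr hmem)
      simp only [List.nodup_append, List.nodup_cons, List.nodup_nil]
      refine ⟨hnd, by simp, ?_⟩
      intro a ha b hb
      rw [List.mem_singleton.mp hb]
      exact fun heq => hxs (heq ▸ ha)

def pvChain (v : Int) (L : Nat) : List Int := (List.range L).map (fun j : Nat => v + (j : Int))

lemma pvChain_length (v : Int) (L : Nat) : (pvChain v L).length = L := by simp [pvChain]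

lemma pvChain_pairwise (v : Int) (L : Nat) : (pvChain v L).Pairwise (· < ·) := by
  exact List.Pairwise.map _ (fun a b (h : a < b) => by omega) List.pairwise_lt_range

lemma pvChain_nodup (v : Int) (L : Nat) : (pvChain v L).Nodup :=
  (pvChain_pairwise v L).imp (fun h => ne_of_lt h)

lemma pvChain_getElem (v : Int) (L : Nat) (i : Nat) (hi : i < L) :
    (pvChain v L)[i]'(by simp [pvChain_length, hi]) = v + (i : Int) := by
  simp only [pvChain]
  rw [List.getElem_map, List.getElem_range]

-- a strictly increasing integer list whose span equals its length minus one is consecutive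
lemma pvConsecutive (t : List Int) (hp : t.Pairwise (· < ·)) (hne : 0 < t.length)
    (M m : Int) (hM : M ∈ t) (hMmax : ∀ y ∈ t, y ≤ M) (hm : m ∈ t) (hmmin : ∀ y ∈ t, m ≤ y)
    (hspan : M - m = (t.length : Int) - 1) : t = pvChain m t.length := by
  have hmono := List.pairwise_iff_getElem.mp hp
  have key : ∀ d i (h : i + d < t.length), t[i]'(by omega) + (d : Int) ≤ t[i + d]'h := by
    intro d
    induction d with
    | zero => intro i h; simp
    | succ d ihd =>
      intro i h
      have h1 := ihd i (by omega)
      have h2 := hmono (i + d) (i + d + 1) (by omega) (by omega) (by omega)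
      show t[i]'(by omega) + ((d + 1 : Nat) : Int) ≤ t[i + d + 1]'(by omega)
      push_cast
      omega
  -- m = t[0], M = t[last]
  have h0 : m = t[0]'(by omega) := by
    rcases List.mem_iff_getElem.mp hm with ⟨k, hk, hkeq⟩
    have h1 : t[0]'(by omega) ≤ t[k]'hk := by
      rcases Nat.eq_zero_or_pos k with h | h
      · subst h; exact le_refl _
      · exact le_of_lt (hmono 0 k (by omega) hk h)
    have h2 := hmmin (t[0]'(by omega)) (List.getElem_mem _)
    omega
  have hlast : M = t[t.length - 1]'(by omega) := by
    rcases List.mem_iff_getElem.mp hM with ⟨k, hk, hkeq⟩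
    have h1 : t[k]'hk ≤ t[t.length - 1]'(by omega) := by
      rcases Nat.lt_or_ge k (t.length - 1) with h | h
      · exact le_of_lt (hmono k (t.length - 1) hk (by omega) h)
      · have : k = t.length - 1 := by omega
        subst this; exact le_refl _
    have h2 := hMmax (t[t.length - 1]'(by omega)) (List.getElem_mem _)
    omega
  apply List.ext_getElem (by rw [pvChain_length])
  intro i hi hi'
  rw [pvChain_getElem m t.length i hi]
  have hlow : t[0]'(by omega) + (i : Int) ≤ t[i]'hi := by
    have := key i 0 (by omega)
    simpa using this
  have hhigh : t[i]'hi + ((t.length - 1 - i : Nat) : Int) ≤ t[t.length - 1]'(by omega) := by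
    have := key (t.length - 1 - i) i (by omega)
    have heq : i + (t.length - 1 - i) = t.length - 1 := by omega
    simp only [heq] at this
    exact this
  omega

def pvPred (length : Int) (subset : List Int) : Bool :=
  decide ((PySem.List.max? subset (fun x => x)).getD 0 - (PySem.List.min? subset (fun x => x)).getD 0 = length - 1
    ∧ ((PySem.Set.ofList subset).length : Int) = length)

lemma pvChain_mem (v : Int) (L : Nat) (y : Int) : y ∈ pvChain v L ↔ ∃ j : Nat, j < L ∧ y = v + (j : Int) := by
  simp [pvChain, List.mem_map, List.mem_range, eq_comm]

lemma pvChain_inj (v w : Int) (L : Nat) (hL : 0 < L) (h : pvChain v L = pvChain w L) : v = w := by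
  have h0 : (pvChain v L)[0]'(by rw [pvChain_length]; omega) = (pvChain w L)[0]'(by rw [pvChain_length]; omega) := by
    simp only [h]
  rw [pvChain_getElem v L 0 hL, pvChain_getElem w L 0 hL] at h0
  simpa using h0

lemma pvPred_iff (xs : List Int) (L : Nat) (hL : 3 ≤ L) (t : List Int)
    (ht : t ∈ PySem.List.combinations (PySem.List.sorted xs (fun x => x) false) L) :
    pvPred (L : Int) t = true ↔ ∃ v ∈ PySem.Set.ofList xs, t = pvChain v L := by
  obtain ⟨hsub, hlen⟩ := (PySem.List.mem_combinations_iff _ _ _).mp ht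
  have hne : t ≠ [] := by intro h; rw [h] at hlen; simp at hlen; omega
  have hple : t.Pairwise (· ≤ ·) := (PySem.List.sorted_pairwise xs (fun x => x)).sublist hsub
  unfold pvPred
  rw [decide_eq_true_eq]
  constructor
  · rintro ⟨hspan, hset⟩
    have hnd : t.Nodup := by
      apply pvNodup_of_ofList_length
      omega
    have hplt : t.Pairwise (· < ·) :=
      (hple.and hnd).imp (fun h => lt_of_le_of_ne h.1 h.2)
    cases hmax : PySem.List.max? t (fun x => x) with
    | none => exact absurd ((PySem.List.max?_eq_none_iff t _).mp hmax) hne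
    | some M =>
    cases hmin : PySem.List.min? t (fun x => x) with
    | none => exact absurd ((PySem.List.min?_eq_none_iff t _).mp hmin) hne
    | some m =>
    rw [hmax, hmin] at hspan
    simp only [Option.getD_some] at hspan
    have hcons := pvConsecutive t hplt (by omega) M m (PySem.List.max?_mem hmax)
      (fun y hy => PySem.List.max?_isMax hmax y hy) (PySem.List.min?_mem hmin)
      (fun y hy => PySem.List.min?_isMin hmin y hy) (by rw [hlen]; exact hspan)
    refine ⟨m, ?_, by rw [← hlen]; exact hcons⟩
    rw [PySem.Set.mem_ofList]
    exact ((PySem.List.sorted_perm xs (fun x => x) false).mem_iff).mp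
      (hsub.mem (PySem.List.min?_mem hmin))
  · rintro ⟨v, hv, rfl⟩
    have hndc : (pvChain v L).Nodup := pvChain_nodup v L
    have hvmem : v ∈ pvChain v L := (pvChain_mem v L v).mpr ⟨0, by omega, by simp⟩
    have htop : v + ((L : Int) - 1) ∈ pvChain v L := by
      rw [pvChain_mem]
      exact ⟨L - 1, by omega, by omega⟩
    constructor
    · cases hmax : PySem.List.max? (pvChain v L) (fun x => x) with
      | none =>
        rw [PySem.List.max?_eq_none_iff] at hmax
        rw [hmax] at hvmem
        simp at hvmem
      | some M =>
      cases hmin : PySem.List.min? (pvChain v L) (fun x => x) with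
      | none =>
        rw [PySem.List.min?_eq_none_iff] at hmin
        rw [hmin] at hvmem
        simp at hvmem
      | some m =>
      simp only [Option.getD_some]
      have hMc := (pvChain_mem v L M).mp (PySem.List.max?_mem hmax)
      have hmc := (pvChain_mem v L m).mp (PySem.List.min?_mem hmin)
      have hMge := PySem.List.max?_isMax hmax _ htop
      have hmle := PySem.List.min?_isMin hmin _ hvmem
      obtain ⟨jM, hjM, rfl⟩ := hMc
      obtain ⟨jm, hjm, rfl⟩ := hmc
      omega
    · rw [PySem.Set.ofList_eq_self_of_nodup _ hndc, pvChain_length]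

lemma pvSum_indicator_one {β : Type} [DecidableEq β] (V : List β) (v0 : β) (q : β → Prop) [DecidablePred q] :
    V.Nodup → v0 ∈ V → (∀ v ∈ V, q v ↔ v = v0) →
    (V.map (fun v => if q v then (1 : Int) else 0)).sum = 1 := by
  induction V with
  | nil => intro _ h; simp at h
  | cons w V' ih =>
    intro hnd hmem hq
    rcases List.mem_cons.mp hmem with h0 | h0
    · subst h0
      have h1 : (if q v0 then (1:Int) else 0) = 1 := by
        rw [if_pos ((hq v0 (by simp)).mpr rfl)]
      have h2 : (V'.map (fun v => if q v then (1 : Int) else 0)).sum = 0 := by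
        apply List.sum_eq_zero
        intro x hx
        rcases List.mem_map.mp hx with ⟨v, hv, rfl⟩
        rw [if_neg]
        intro hqv
        exact (List.nodup_cons.mp hnd).1 (((hq v (by simp [hv])).mp hqv) ▸ hv)
      simp [h1, h2]
    · have hne : ¬ q w := by
        intro hqw
        have := (hq w (by simp)).mp hqw
        subst this
        exact (List.nodup_cons.mp hnd).1 h0
      have := ih (List.nodup_cons.mp hnd).2 h0 (fun v hv => hq v (by simp [hv]))
      simp [hne, this]

lemma pvCountP_eq_sum_count {α β : Type} [BEq α] [LawfulBEq α] [DecidableEq α] [DecidableEq β] (l : List α) (V : List β) (g : β → α)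
    (p : α → Bool) (hV : V.Nodup) (hg : ∀ v w, g v = g w → v = w)
    (h : ∀ t ∈ l, p t = true ↔ ∃ v ∈ V, t = g v) :
    (l.countP p : Int) = (V.map (fun v => (l.count (g v) : Int))).sum := by
  induction l with
  | nil =>
    simp only [List.countP_nil, List.count_nil, Nat.cast_zero]
    rw [List.sum_eq_zero]
    intro x hx
    rcases List.mem_map.mp hx with ⟨v, hv, rfl⟩
    rfl
  | cons t l' ih =>
    have hmapeq : ∀ v : β, (((t :: l').count (g v) : Int)) = (l'.count (g v) : Int) + (if t = g v then (1:Int) else 0) := by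
      intro v
      rw [List.count_cons]
      by_cases hh : t = g v
      · simp [hh]
      · simp [beq_iff_eq, hh]
    rw [List.countP_cons]
    have ih' := ih (fun t ht => h t (by simp [ht]))
    have hsplit : (V.map (fun v => ((t :: l').count (g v) : Int))).sum
        = (V.map (fun v => (l'.count (g v) : Int))).sum + (V.map (fun v => if t = g v then (1:Int) else 0)).sum := by
      rw [← List.sum_map_add]
      congr 1
      exact List.map_congr_left (fun v _ => hmapeq v)
    rw [hsplit, ← ih']
    by_cases hp : p t = true
    · rcases (h t (by simp)).mp hp with ⟨v0, hv0, ht0⟩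
      have hone : (V.map (fun v => if t = g v then (1:Int) else 0)).sum = 1 := by
        apply pvSum_indicator_one V v0 (fun v => t = g v) hV hv0
        intro v hv
        constructor
        · intro he; exact hg v v0 ((he ▸ ht0 : g v = g v0))
        · intro he; subst he; exact ht0
      rw [hone]
      simp [hp]
    · have hz : (V.map (fun v => if t = g v then (1:Int) else 0)).sum = 0 := by
        apply List.sum_eq_zero
        intro x hx
        rcases List.mem_map.mp hx with ⟨v, hv, rfl⟩
        rw [if_neg]
        intro he
        exact hp ((h t (by simp)).mpr ⟨v, hv, he⟩)
      rw [hz]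
      simp [Bool.eq_false_iff.mpr hp]

lemma pvCount_comb_zero (s : List Int) (r : List Int) (y : Int) (hy : y ∈ r) (hys : y ∉ s) :
    (PySem.List.combinations s r.length).count r = 0 := by
  rw [List.count_eq_zero]
  intro hr
  have hsub := ((PySem.List.mem_combinations_iff s r.length r).mp hr).1
  exact hys (hsub.mem hy)

lemma pvCount_combinations (s : List Int) :
    s.Pairwise (· ≤ ·) → ∀ (r : List Int), r.Pairwise (· < ·) →
    ((PySem.List.combinations s r.length).count r : Int) = (r.map (fun y => (s.count y : Int))).prod := by
  induction s with
  | nil =>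
    intro _ r _
    cases r with
    | nil => simp [PySem.List.combinations_zero]
    | cons y r' =>
      rw [List.length_cons, PySem.List.combinations_nil_succ]
      simp
  | cons x s' ih =>
    intro hs r hr
    have hs' : s'.Pairwise (· ≤ ·) := hs.tail
    cases r with
    | nil => simp [PySem.List.combinations_zero]
    | cons y r' =>
      have hr' : r'.Pairwise (· < ·) := hr.tail
      rcases lt_trichotomy y x with hlt | heq | hgt
      · -- y < x ≤ every element of s': y occurs nowhere, both sides vanish
        have hys : y ∉ x :: s' := by
          intro hmem
          rcases List.mem_cons.mp hmem with h | h
          · omega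
          · exact absurd (List.rel_of_pairwise_cons hs h) (by omega)
        rw [pvCount_comb_zero _ _ y (by simp) hys]
        have : ((x :: s').count y : Int) = 0 := by
          rw [List.count_eq_zero.mpr hys]; rfl
        rw [List.map_cons, List.prod_cons, this]
        simp
      · -- y = x: the combinations containing the head x plus those avoiding it
        subst heq
        rw [List.length_cons, PySem.List.combinations_cons_succ, List.count_append]
        have h1 : ((PySem.List.combinations s' r'.length).map (y :: ·)).count (y :: r')
            = (PySem.List.combinations s' r'.length).count r' :=
          List.count_map_of_injective _ _ (fun a b hab => by simpa using hab) _
        have h2 := ih hs' r' hr'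
        have h3 := ih hs' (y :: r') hr
        rw [List.length_cons] at h3
        push_cast
        rw [h1]
        push_cast at h2 h3
        rw [h2, h3]
        have hcnt : ∀ z ∈ r', ((y :: s').count z : Int) = (s'.count z : Int) := by
          intro z hz
          have : y < z := List.rel_of_pairwise_cons hr hz
          rw [List.count_cons]
          simp [show ¬ y = z by omega]
        simp only [List.map_cons, List.prod_cons]
        rw [List.map_congr_left (fun z hz => hcnt z hz), List.count_cons]
        simp
        ring
      · -- x < y ≤ every element of y :: r': the head x matches nothing
        rw [List.length_cons, PySem.List.combinations_cons_succ, List.count_append]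
        have h1 : ((PySem.List.combinations s' r'.length).map (x :: ·)).count (y :: r') = 0 := by
          rw [List.count_eq_zero]
          intro hmem
          rcases List.mem_map.mp hmem with ⟨t, _, hteq⟩
          have hxy : x = y := by injection hteq
          omega
        have h3 := ih hs' (y :: r') hr
        rw [List.length_cons] at h3
        push_cast
        rw [h1]
        rw [h3]
        have hcnt : ∀ z ∈ y :: r', ((x :: s').count z : Int) = (s'.count z : Int) := by
          intro z hz
          have hzy : y ≤ z := by
            rcases List.mem_cons.mp hz with h | h
            · omega
            · have := List.rel_of_pairwise_cons hr h; omega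
          rw [List.count_cons]
          simp [show ¬ x = z by omega]
        rw [List.map_congr_left hcnt]
        simp

def pvWays (xs : List Int) (L : Int) : Int :=
  (PySem.Dict.counter xs).keys.foldl (fun w start =>
    w + (PySem.List.pyRange 0 L 1).foldl (fun p j => p * (PySem.Dict.counter xs).getD (start + j) 0) 1) 0

lemma pvFoldl_mul {α : Type} (l : List α) (f : α → Int) : ∀ (a : Int),
    l.foldl (fun p j => p * f j) a = a * (l.map f).prod := by
  induction l with
  | nil => intro a; simp
  | cons x l ih =>
    intro a
    rw [List.foldl_cons, ih, List.map_cons, List.prod_cons]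
    ring

lemma pvRunLen_eq (xs : List Int) (L : Nat) (hL : 3 ≤ L) :
    ((PySem.List.combinations (PySem.List.sorted xs (fun x => x) false) L).countP (pvPred (L : Int)) : Int)
    = pvWays xs (L : Int) := by
  have h1 := pvCountP_eq_sum_count (PySem.List.combinations (PySem.List.sorted xs (fun x => x) false) L)
    (PySem.Set.ofList xs) (fun v => pvChain v L) (pvPred (L : Int))
    (PySem.Set.nodup_ofList xs)
    (fun v w h => pvChain_inj v w L (by omega) h)
    (fun t ht => pvPred_iff xs L hL t ht)
  rw [h1]
  unfold pvWays
  rw [PySem.Dict.keys_counter, PySem.List.foldl_add, zero_add]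
  apply congrArg
  apply List.map_congr_left
  intro v hv
  beta_reduce
  -- left: count of the chain among the combinations = product of counts
  have h2 := pvCount_combinations (PySem.List.sorted xs (fun x => x) false)
    (PySem.List.sorted_pairwise xs (fun x => x)) (pvChain v L) (pvChain_pairwise v L)
  rw [pvChain_length] at h2
  refine h2.trans ?_
  -- right: the fold is the same product
  rw [PySem.List.pyRange_zero_natCast, List.foldl_map, pvFoldl_mul, one_mul]
  unfold pvChain
  rw [List.map_map]
  apply congrArg
  apply List.map_congr_left
  intro j hj
  simp only [Function.comp_apply]
  rw [PySem.Dict.getD_counter]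
  exact congrArg _ ((PySem.List.sorted_perm xs (fun x => x) false).count_eq _)

lemma pvFoldl_if_pair_true {α : Type} (p : α → Prop) [DecidablePred p] (L : Int) :
    ∀ (l : List α) (m o : Int),
    l.foldl (fun ms t => if p t then (ms.1 + L, ms.2) else ms) (m, o)
      = (m + L * (l.countP (fun t => decide (p t)) : Int), o) := by
  intro l
  induction l with
  | nil => intro m o; simp
  | cons t l ih =>
    intro m o
    rw [List.foldl_cons, List.countP_cons]
    by_cases hp : p t
    · simp only [if_pos hp, ih]
      simp [hp]
      ring
    · simp only [if_neg hp, ih]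
      simp [hp]

lemma pvFoldl_if_pair_false {α : Type} (p : α → Prop) [DecidablePred p] (L : Int) :
    ∀ (l : List α) (m o : Int),
    l.foldl (fun ms t => if p t then (ms.1, ms.2 + L) else ms) (m, o)
      = (m, o + L * (l.countP (fun t => decide (p t)) : Int)) := by
  intro l
  induction l with
  | nil => intro m o; simp
  | cons t l ih =>
    intro m o
    rw [List.foldl_cons, List.countP_cons]
    by_cases hp : p t
    · simp only [if_pos hp, ih]
      simp [hp]
      ring
    · simp only [if_neg hp, ih]
      simp [hp]

lemma pvRunsA_true (s : List Int) : ∀ (Ls : List Int) (m o : Int),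
    Ls.foldl (fun ms length =>
      (PySem.List.combinations s length.toNat).foldl (fun ms subset =>
        if (PySem.List.max? subset (fun x => x)).getD 0 - (PySem.List.min? subset (fun x => x)).getD 0 = length - 1
            ∧ ((PySem.Set.ofList subset).length : Int) = length then (ms.1 + length, ms.2) else ms) ms) (m, o)
  = (m + (Ls.map (fun length => length * ((PySem.List.combinations s length.toNat).countP (fun t => decide ((PySem.List.max? t (fun x => x)).getD 0 - (PySem.List.min? t (fun x => x)).getD 0 = length - 1
          ∧ ((PySem.Set.ofList t).length : Int) = length)) : Int))).sum, o) := by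
  intro Ls
  induction Ls with
  | nil => intro m o; simp
  | cons L Ls ih =>
    intro m o
    rw [List.foldl_cons, List.map_cons, List.sum_cons,
      pvFoldl_if_pair_true (p := fun subset =>
        (PySem.List.max? subset (fun x => x)).getD 0 - (PySem.List.min? subset (fun x => x)).getD 0 = L - 1
          ∧ ((PySem.Set.ofList subset).length : Int) = L) L, ih]
    congr 1
    ring

lemma pvRunsA_false (s : List Int) : ∀ (Ls : List Int) (m o : Int),
    Ls.foldl (fun ms length =>
      (PySem.List.combinations s length.toNat).foldl (fun ms subset =>
        if (PySem.List.max? subset (fun x => x)).getD 0 - (PySem.List.min? subset (fun x => x)).getD 0 = length - 1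
            ∧ ((PySem.Set.ofList subset).length : Int) = length then (ms.1, ms.2 + length) else ms) ms) (m, o)
  = (m, o + (Ls.map (fun length => length * ((PySem.List.combinations s length.toNat).countP (fun t => decide ((PySem.List.max? t (fun x => x)).getD 0 - (PySem.List.min? t (fun x => x)).getD 0 = length - 1
          ∧ ((PySem.Set.ofList t).length : Int) = length)) : Int))).sum) := by
  intro Ls
  induction Ls with
  | nil => intro m o; simp
  | cons L Ls ih =>
    intro m o
    rw [List.foldl_cons, List.map_cons, List.sum_cons,
      pvFoldl_if_pair_false (p := fun subset =>
        (PySem.List.max? subset (fun x => x)).getD 0 - (PySem.List.min? subset (fun x => x)).getD 0 = L - 1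
          ∧ ((PySem.Set.ofList subset).length : Int) = L) L, ih]
    congr 1
    ring

lemma pvTurn_iff (dealer : Bool) (i : Int) (hi : 0 ≤ i) :
    (i ∈ (if !dealer then PySem.List.pyRange 0 8 2 else PySem.List.pyRange 1 8 2))
      ↔ (i < 8 ∧ PySem.Int.mod i 2 = (if dealer then 1 else 0)) := by
  cases dealer
  · rw [show (if !false then PySem.List.pyRange 0 8 2 else PySem.List.pyRange 1 8 2)
        = PySem.List.pyRange 0 8 2 from rfl,
      PySem.List.mem_pyRange_iff_of_pos (by norm_num), PySem.Int.mod_eq_emod_of_pos (by norm_num)]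
    rw [show (if (false : Bool) then (1 : Int) else 0) = 0 from rfl]
    constructor
    · rintro ⟨h1, h2, h3⟩
      exact ⟨h2, by omega⟩
    · rintro ⟨h1, h2⟩
      exact ⟨by omega, h1, by omega⟩
  · rw [show (if !true then PySem.List.pyRange 0 8 2 else PySem.List.pyRange 1 8 2)
        = PySem.List.pyRange 1 8 2 from rfl,
      PySem.List.mem_pyRange_iff_of_pos (by norm_num), PySem.Int.mod_eq_emod_of_pos (by norm_num)]
    rw [show (if (true : Bool) then (1 : Int) else 0) = 1 from rfl]
    constructor
    · rintro ⟨h1, h2, h3⟩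
      exact ⟨h2, by omega⟩
    · rintro ⟨h1, h2⟩
      exact ⟨by omega, h1, by omega⟩

lemma pvCounterStepA (vals : List Int) (v : Int) :
    (PySem.Dict.counter vals).modify v 0 (· + 1) = PySem.Dict.counter (vals ++ [v]) :=
  (PySem.Dict.counter_append_singleton vals v).symm

lemma pvCounterStepB (vals : List Int) (v : Int) :
    (PySem.Dict.counter vals).insert v ((PySem.Dict.counter vals).getD v 0 + 1)
      = PySem.Dict.counter (vals ++ [v]) := by
  have h := PySem.Dict.foldl_insert_getD_add_one_eq_counter (vals ++ [v])
  rw [List.foldl_append, PySem.Dict.foldl_insert_getD_add_one_eq_counter vals] at h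
  simpa using h

lemma pvS1531_t (T my opp : Int) :
    (if T = 15 then (my + 2, opp) else if T = 31 then (my + 2, opp) else (my, opp))
      = (my + (if T = 15 ∨ T = 31 then 2 else 0), opp) := by
  split_ifs <;> simp_all
lemma pvS1531_f (T my opp : Int) :
    (if T = 15 then (my, opp + 2) else if T = 31 then (my, opp + 2) else (my, opp))
      = (my, opp + (if T = 15 ∨ T = 31 then 2 else 0)) := by
  split_ifs <;> simp_all
lemma pvPairs_t (c my opp : Int) :
    (if c = 2 then (my + 2, opp) else if c = 3 then (my + 4, opp)
      else if c = 4 then (my + 6, opp) else (my, opp))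
      = (my + (if 2 ≤ c ∧ c ≤ 4 then 2 * (c - 1) else 0), opp) := by
  split_ifs <;> simp_all <;> omega
lemma pvPairs_f (c my opp : Int) :
    (if c = 2 then (my, opp + 2) else if c = 3 then (my, opp + 4)
      else if c = 4 then (my, opp + 6) else (my, opp))
      = (my, opp + (if 2 ≤ c ∧ c ≤ 4 then 2 * (c - 1) else 0)) := by
  split_ifs <;> simp_all <;> omega

def pvPts (pre : List (Int × Int)) (card : Int × Int) (total : Int) : Int :=
  (if total + card_value card = 15 ∨ total + card_value card = 31 then 2 else 0)
  + (if 2 ≤ (PySem.Dict.counter (pre.map card_value ++ [card_value card])).getD (card_value card) 0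
        ∧ (PySem.Dict.counter (pre.map card_value ++ [card_value card])).getD (card_value card) 0 ≤ 4
      then 2 * ((PySem.Dict.counter (pre.map card_value ++ [card_value card])).getD (card_value card) 0 - 1) else 0)
  + ((PySem.List.pyRange 3 (min ((pre.length : Int) + 1 + 1) 6) 1).map
      (fun length => length * pvWays (pre.map card_value ++ [card_value card]) length)).sum

lemma pvStepB_eq (parity : Int) (pre : List (Int × Int)) (card : Int × Int) (my opp total : Int) :
    pvStepB parity (my, opp, total, PySem.Dict.counter (pre.map card_value)) ((pre.length : Int), card)
      = (if ((pre.length : Int) < 8 ∧ PySem.Int.mod (pre.length : Int) 2 = parity)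
          then (my + pvPts pre card total, opp, total + card_value card,
                PySem.Dict.counter (pre.map card_value ++ [card_value card]))
          else (my, opp + pvPts pre card total, total + card_value card,
                PySem.Dict.counter (pre.map card_value ++ [card_value card]))) := by
  simp only [pvStepB, pvPts]
  rw [show (min card.1 10) = card_value card from rfl]
  rw [pvCounterStepB]
  rw [PySem.List.foldl_add]
  split_ifs <;> rfl

lemma pvStepA_eq (my_turns : List Int) (pre : List (Int × Int)) (card : Int × Int) (my opp total : Int) :
    pvStepA my_turns (my, opp, total, pre, PySem.Dict.counter (pre.map card_value)) ((pre.length : Int), card)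
      = (if ((pre.length : Int) ∈ my_turns)
          then (my + pvPts pre card total, opp, total + card_value card, pre ++ [card],
                PySem.Dict.counter (pre.map card_value ++ [card_value card]))
          else (my, opp + pvPts pre card total, total + card_value card, pre ++ [card],
                PySem.Dict.counter (pre.map card_value ++ [card_value card]))) := by
  simp only [pvStepA, pvPts]
  rw [pvCounterStepA]
  rw [show ((pre ++ [card]).map (fun c => card_value c)) = (pre.map card_value ++ [card_value card]) from by simp]
  rw [show (((pre ++ [card]).length : Int) + 1) = ((pre.length : Int) + 1 + 1) from by simp [List.length_append]]
  have hsum : ∀ (mm oo : Int),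
      ((PySem.List.pyRange 3 (min ((pre.length : Int) + 1 + 1) 6) 1).map
        (fun length => length * ((PySem.List.combinations
            (PySem.List.sorted (pre.map card_value ++ [card_value card]) (fun x => x) false) length.toNat).countP
          (fun t => decide ((PySem.List.max? t (fun x => x)).getD 0 - (PySem.List.min? t (fun x => x)).getD 0 = length - 1
            ∧ ((PySem.Set.ofList t).length : Int) = length)) : Int))).sum
      = ((PySem.List.pyRange 3 (min ((pre.length : Int) + 1 + 1) 6) 1).map
          (fun length => length * pvWays (pre.map card_value ++ [card_value card]) length)).sum := by
    intro mm oo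
    apply congrArg
    apply List.map_congr_left
    intro L hL
    have h35 : 3 ≤ L := by
      have := (PySem.List.mem_pyRange_iff_of_pos (by norm_num : (0:Int) < 1) L).mp hL
      omega
    have hcast : ((L.toNat : Nat) : Int) = L := Int.toNat_of_nonneg (by omega)
    have hrl := pvRunLen_eq (pre.map card_value ++ [card_value card]) L.toNat (by omega)
    rw [hcast] at hrl
    exact congrArg (fun z => L * z) hrl
  by_cases hbm : ((pre.length : Int) ∈ my_turns)
  · have hd : decide ((pre.length : Int) ∈ my_turns) = true := decide_eq_true hbm
    simp only [hd, if_true, if_pos hbm]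
    rw [pvS1531_t, pvPairs_t, pvRunsA_true, hsum my opp]
    exact Prod.ext (by ring) rfl
  · have hd : decide ((pre.length : Int) ∈ my_turns) = false := decide_eq_false hbm
    simp only [hd, if_neg (by simp : ¬ (false : Bool) = true), if_neg hbm]
    rw [pvS1531_f, pvPairs_f, pvRunsA_false, hsum my opp]
    refine Prod.ext rfl (Prod.ext (by ring) rfl)

lemma pvStep_corr (dealer : Bool) (pre : List (Int × Int)) (card : Int × Int) (my opp total : Int) :
    ∃ my' opp' : Int,
      pvStepA (if !dealer then PySem.List.pyRange 0 8 2 else PySem.List.pyRange 1 8 2)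
          (my, opp, total, pre, PySem.Dict.counter (pre.map card_value)) ((pre.length : Int), card)
        = (my', opp', total + card_value card, pre ++ [card],
            PySem.Dict.counter ((pre ++ [card]).map card_value))
      ∧ pvStepB (if dealer then 1 else 0)
          (my, opp, total, PySem.Dict.counter (pre.map card_value)) ((pre.length : Int), card)
        = (my', opp', total + card_value card,
            PySem.Dict.counter ((pre ++ [card]).map card_value)) := by
  rw [show (pre ++ [card]).map card_value = pre.map card_value ++ [card_value card] from by simp]
  have hiff := pvTurn_iff dealer (pre.length : Int) (by positivity)
  by_cases hb : ((pre.length : Int) ∈ (if !dealer then PySem.List.pyRange 0 8 2 else PySem.List.pyRange 1 8 2))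
  · exact ⟨my + pvPts pre card total, opp,
      by rw [pvStepA_eq, if_pos hb],
      by rw [pvStepB_eq, if_pos (hiff.mp hb)]⟩
  · exact ⟨my, opp + pvPts pre card total,
      by rw [pvStepA_eq, if_neg hb],
      by rw [pvStepB_eq, if_neg (fun hc => hb (hiff.mpr hc))]⟩

lemma pvLoop (dealer : Bool) : ∀ (rest pre : List (Int × Int)) (my opp total : Int),
    ((PySem.List.enumerate rest (pre.length : Int)).foldl
        (pvStepA (if !dealer then PySem.List.pyRange 0 8 2 else PySem.List.pyRange 1 8 2))
        (my, opp, total, pre, PySem.Dict.counter (pre.map card_value))).1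
  = ((PySem.List.enumerate rest (pre.length : Int)).foldl
        (pvStepB (if dealer then 1 else 0))
        (my, opp, total, PySem.Dict.counter (pre.map card_value))).1 := by
  intro rest
  induction rest with
  | nil => intro pre my opp total; rfl
  | cons card rest ih =>
    intro pre my opp total
    rw [PySem.List.enumerate_cons, List.foldl_cons, List.foldl_cons]
    obtain ⟨my', opp', hA, hB⟩ := pvStep_corr dealer pre card my opp total
    rw [hA, hB]
    have hlen : (pre.length : Int) + 1 = (((pre ++ [card]).length : Nat) : Int) := by
      simp [List.length_append]
    rw [hlen]
    exact ih (pre ++ [card]) my' opp' (total + card_value card)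


-- ===== VERDICT (by name: the statement is the Claim_ definition above) =====
theorem score_play_sequence_spec : Claim_equal_score_play_sequence := by
  unfold Claim_equal_score_play_sequence
  intro play_seq is_dealer _
  unfold Spec_score_play_sequence score_play_sequence score_play_sequence_alt
  have h := pvLoop is_dealer play_seq [] 0 0 0
  simpa using h
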